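-- pv_equiv track=rewrite | github.com/binchoi/study | python/05-top-leet-questions/02-medium-collection/other/lexicographical-comparison.py | solution
-- ===== SOURCE A (Python) =====
-- def solution(s, t):
--     res = 0
--
--     for i in range(len(s)):
--         if s[i].isdigit():
--             prefix = s[:i]
--             postfix = s[i + 1:]
--             if f"{prefix}{postfix}" < t:
--                 res += 1
--
--     for i in range(len(t)):
--         if t[i].isdigit():
--             prefix = t[:i]
--             postfix = t[i + 1:]
--             if s < f"{prefix}{postfix}":
--                 res += 1
--     return res
-- ===== SOURCE B (Python) =====
-- def solution(s, t):
--     # Same count, but O(n+m): precompute LCP of s,t and two shifted-LCP arrays,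
--     # then resolve each single-deletion lexicographic comparison in O(1).
--     n, m = len(s), len(t)
--     p = 0
--     while p < n and p < m and s[p] == t[p]:
--         p += 1
--
--     def shift_lcp(x, y):
--         # L[i] = lcp(x[i+1:], y[i:]) for 0 <= i < len(x), built back to front
--         L = [0] * len(x)
--         for i in range(len(x) - 1, -1, -1):
--             if i + 1 < len(x) and i < len(y) and x[i + 1] == y[i]:
--                 L[i] = L[i + 1] + 1
--         return L
--
--     M = shift_lcp(s, t)  # lcp(s[i+1:], t[i:])
--     N = shift_lcp(t, s)  # lcp(t[j+1:], s[j:]) = lcp(s[j:], t[j+1:])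
--
--     res = 0
--     for i in range(n):
--         if s[i].isdigit():
--             if i > p:
--                 if p < m and s[p] < t[p]:
--                     res += 1
--             else:
--                 k = M[i]
--                 if (i + 1 + k == n and i + k < m) or (i + 1 + k < n and i + k < m and s[i + 1 + k] < t[i + k]):
--                     res += 1
--     for j in range(m):
--         if t[j].isdigit():
--             if j > p:
--                 if (s[p] < t[p]) if p < n else (m > n + 1):
--                     res += 1
--             else:
--                 k = N[j]
--                 if (j + k == n and j + 1 + k < m) or (j + k < n and j + 1 + k < m and s[j + k] < t[j + 1 + k]):
--                     res += 1
--     return res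
-- ===== Notes on version B (the rewrite author's own statement) =====
-- stated objective: alternative
-- what changed: A rebuilds and lexicographically compares a full deletion string for every digit position; B precomputes the LCP of s and t plus two backward shifted-LCP arrays and decides each single-deletion comparison by a character test at the first-mismatch index (worst-case O(n+m) vs A's O((n+m)^2), but not measurably faster on the timing inputs, which contain few digits).
import Mathlib
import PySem

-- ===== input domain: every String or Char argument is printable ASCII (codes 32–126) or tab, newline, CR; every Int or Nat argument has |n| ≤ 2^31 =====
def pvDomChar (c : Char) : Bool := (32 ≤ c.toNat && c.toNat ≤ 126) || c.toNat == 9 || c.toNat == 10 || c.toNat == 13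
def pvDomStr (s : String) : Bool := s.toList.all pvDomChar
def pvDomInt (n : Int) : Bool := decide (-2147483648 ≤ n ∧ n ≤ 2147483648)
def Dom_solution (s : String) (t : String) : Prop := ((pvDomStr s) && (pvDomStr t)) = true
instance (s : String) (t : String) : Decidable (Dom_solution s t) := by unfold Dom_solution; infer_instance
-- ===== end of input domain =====

-- B precomputes the LCP of s and t plus two backward shifted-LCP arrays and decides each
-- single-deletion comparison by a character test at the first-mismatch index, instead of
-- rebuilding and comparing a deletion string per digit position (objective: alternative).

-- ===== PORT A =====
def solution (s : String) (t : String) : Int :=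
  let cs := s.toList
  let ct := t.toList
  let res := (PySem.List.pyRange 0 (PySem.Chars.len cs) 1).foldl (fun res i =>
    if PySem.Chars.strIsdigit [PySem.List.pyGetD cs i ' '] then
      if (PySem.List.slice cs none (some i) ++ PySem.List.slice cs (some (i + 1)) none) < ct then res + 1 else res
    else res) (0 : Int)
  (PySem.List.pyRange 0 (PySem.Chars.len ct) 1).foldl (fun res i =>
    if PySem.Chars.strIsdigit [PySem.List.pyGetD ct i ' '] then
      if cs < (PySem.List.slice ct none (some i) ++ PySem.List.slice ct (some (i + 1)) none) then res + 1 else res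
    else res) res

-- ===== PORT B =====
-- lcp of two strings (B's initial while loop)
def lcpLen : List Char → List Char → Nat
  | a :: u, b :: v => if a = b then lcpLen u v + 1 else 0
  | _, _ => 0

-- B's backward DP array: (shiftLcp x y)[i] = lcp(x[i+1:], y[i:])
def shiftLcp : List Char → List Char → List Nat
  | [], _ => []
  | _ :: x', [] => 0 :: shiftLcp x' []
  | _ :: x', b :: y' =>
    let rest := shiftLcp x' y'
    (match x' with
     | a :: _ => if a = b then rest.getD 0 0 + 1 else 0
     | [] => 0) :: rest

def solution_alt (s : String) (t : String) : Int :=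
  let cs := s.toList
  let ct := t.toList
  let n := cs.length
  let m := ct.length
  let p := lcpLen cs ct
  let M := shiftLcp cs ct
  let N := shiftLcp ct cs
  let res := (List.range n).foldl (fun res i =>
    if PySem.Chars.strIsdigit [cs.getD i ' '] then
      if p < i then
        if p < m ∧ cs.getD p ' ' < ct.getD p ' ' then res + 1 else res
      else
        let k := M.getD i 0
        if (i + 1 + k = n ∧ i + k < m) ∨ (i + 1 + k < n ∧ i + k < m ∧ cs.getD (i + 1 + k) ' ' < ct.getD (i + k) ' ') then res + 1 else res
    else res) (0 : Int)
  (List.range m).foldl (fun res j =>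
    if PySem.Chars.strIsdigit [ct.getD j ' '] then
      if p < j then
        if (if p < n then cs.getD p ' ' < ct.getD p ' ' else n + 1 < m) then res + 1 else res
      else
        let k := N.getD j 0
        if (j + k = n ∧ j + 1 + k < m) ∨ (j + k < n ∧ j + 1 + k < m ∧ cs.getD (j + k) ' ' < ct.getD (j + 1 + k) ' ') then res + 1 else res
    else res) res

-- ===== PRECONDITION & SPEC =====
def Spec_solution (s : String) (t : String) (out : Int) : Prop := out = solution_alt s t
instance (s : String) (t : String) (out : Int) : Decidable (Spec_solution s t out) := by unfold Spec_solution; infer_instance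

-- ===== CLAIM (what is proved, stated in full; the proofs are below) =====
def Claim_equal_solution : Prop := ∀ (s : String) (t : String), Dom_solution s t → Spec_solution s t (solution s t)

-- ===== LEMMAS AND PROOFS =====


theorem lcpLen_le_left (u v : List Char) : lcpLen u v ≤ u.length := by
  induction u generalizing v with
  | nil => simp [lcpLen]
  | cons a u ih =>
    cases v with
    | nil => simp [lcpLen]
    | cons b v =>
      simp only [lcpLen]
      split
      · simpa using ih v
      · simp

theorem lcpLen_le_right (u v : List Char) : lcpLen u v ≤ v.length := by
  induction u generalizing v with
  | nil => simp [lcpLen]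
  | cons a u ih =>
    cases v with
    | nil => simp [lcpLen]
    | cons b v =>
      simp only [lcpLen]
      split
      · simpa using ih v
      · simp

theorem lcpLen_comm (u v : List Char) : lcpLen u v = lcpLen v u := by
  induction u generalizing v with
  | nil => cases v <;> rfl
  | cons a u ih =>
    cases v with
    | nil => rfl
    | cons b v =>
      simp only [lcpLen, eq_comm (a := a) (b := b)]
      split <;> simp [ih]

theorem take_lcpLen (u v : List Char) : u.take (lcpLen u v) = v.take (lcpLen u v) := by
  induction u generalizing v with
  | nil => simp [lcpLen]
  | cons a u ih =>
    cases v with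
    | nil => simp [lcpLen]
    | cons b v =>
      simp only [lcpLen]
      split
      · next h => simp [h, List.take_succ_cons, ih]
      · simp

theorem getD_lcpLen_ne (u v : List Char)
    (hu : lcpLen u v < u.length) (hv : lcpLen u v < v.length) :
    u.getD (lcpLen u v) ' ' ≠ v.getD (lcpLen u v) ' ' := by
  induction u generalizing v with
  | nil => simp at hu
  | cons a u ih =>
    cases v with
    | nil => simp at hv
    | cons b v =>
      simp only [lcpLen] at *
      split at hu
      · next h =>
        simp only [h] at hv ⊢
        simpa using ih v (by simpa using hu) (by simpa using hv)
      · next h => simp [if_neg h] at hu hv ⊢; exact h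

theorem lt_iff_lcp (u v : List Char) :
    u < v ↔ (u.length = lcpLen u v ∧ lcpLen u v < v.length) ∨
      (lcpLen u v < u.length ∧ lcpLen u v < v.length ∧
        u.getD (lcpLen u v) ' ' < v.getD (lcpLen u v) ' ') := by
  induction u generalizing v with
  | nil => cases v <;> simp [lcpLen]
  | cons a u ih =>
    cases v with
    | nil => simp [lcpLen, List.not_lt_nil]
    | cons b v =>
      rw [List.cons_lt_cons_iff]
      by_cases h : a = b
      · subst h
        simp only [lcpLen]
        simp [ih v]
      · simp only [lcpLen, if_neg h]
        simp [h, lt_iff_le_and_ne]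

theorem lcpLen_nil_right (u : List Char) : lcpLen u [] = 0 := by
  cases u <;> rfl

theorem lcpLen_eq_of (u v : List Char) (p : Nat) (hu : p ≤ u.length) (hv : p ≤ v.length)
    (ht : u.take p = v.take p)
    (hend : p = u.length ∨ p = v.length ∨ u.getD p ' ' ≠ v.getD p ' ') : lcpLen u v = p := by
  induction u generalizing v p with
  | nil => simp at hu; simp [hu, lcpLen]
  | cons a u ih =>
    cases v with
    | nil => simp at hv; simp [hv, lcpLen_nil_right]
    | cons b v =>
      cases p with
      | zero =>
        have hne : a ≠ b := by
          rcases hend with h | h | h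
          · simp at h
          · simp at h
          · simpa using h
        simp [lcpLen, hne]
      | succ q =>
        simp only [List.take_succ_cons, List.cons.injEq] at ht
        have hab : a = b := ht.1
        simp only [lcpLen, if_pos hab]
        have := ih v q (by simpa using hu) (by simpa using hv) ht.2 (by
          rcases hend with h | h | h
          · left; simpa using h
          · right; left; simpa using h
          · right; right; simpa using h)
        omega


theorem shiftLcp_getD (x y : List Char) (i : Nat) (hi : i < x.length) :
    (shiftLcp x y).getD i 0 = lcpLen (x.drop (i + 1)) (y.drop i) := by
  induction x generalizing y i with
  | nil => simp at hi
  | cons c x' ih =>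
    cases y with
    | nil =>
      cases i with
      | zero => simp [shiftLcp, lcpLen_nil_right]
      | succ j =>
        simp only [shiftLcp, List.getD_cons_succ]
        rw [ih [] j (by simpa using hi)]
        simp [lcpLen_nil_right]
    | cons b y' =>
      cases i with
      | zero =>
        simp only [shiftLcp, List.getD_cons_zero, List.drop_succ_cons, List.drop_zero]
        cases x' with
        | nil => simp [lcpLen]
        | cons a u =>
          simp only [lcpLen]
          split
          · next h =>
            rw [ih y' 0 (by simp)]
            simp
          · rfl
      | succ j =>
        simp only [shiftLcp, List.getD_cons_succ, List.drop_succ_cons]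
        exact ih y' j (by simpa using hi)

theorem getD_drop' (l : List Char) (n m : Nat) (d : Char) : (l.drop n).getD m d = l.getD (n + m) d := by
  simp [List.getD, List.getElem?_drop]

theorem getD_append_left' (l l2 : List Char) (k : Nat) (d : Char) (h : k < l.length) :
    (l ++ l2).getD k d = l.getD k d := by
  simp [List.getD, List.getElem?_append_left h]

theorem getD_take' (l : List Char) (i k : Nat) (d : Char) (h : k < i) :
    (l.take i).getD k d = l.getD k d := by
  simp [List.getD, List.getElem?_take_of_lt h]

theorem append_lt_append_left (w u v : List Char) : (w ++ u) < (w ++ v) ↔ u < v := by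
  induction w with
  | nil => rfl
  | cons a w ih => simp [ih]

theorem take_eq_take_of_le (cs ct : List Char) (i : Nat) (hp : i ≤ lcpLen cs ct) :
    cs.take i = ct.take i := by
  have h := take_lcpLen cs ct
  have h1 : cs.take i = (cs.take (lcpLen cs ct)).take i := by
    rw [List.take_take, Nat.min_eq_left hp]
  rw [h1, h, List.take_take, Nat.min_eq_left hp]

theorem sdel_le (cs ct : List Char) (i : Nat) (hi : i < cs.length) (hp : i ≤ lcpLen cs ct) :
    (cs.take i ++ cs.drop (i + 1)) < ct ↔
      ((i + 1 + (shiftLcp cs ct).getD i 0 = cs.length ∧ i + (shiftLcp cs ct).getD i 0 < ct.length) ∨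
       (i + 1 + (shiftLcp cs ct).getD i 0 < cs.length ∧ i + (shiftLcp cs ct).getD i 0 < ct.length ∧
        cs.getD (i + 1 + (shiftLcp cs ct).getD i 0) ' ' < ct.getD (i + (shiftLcp cs ct).getD i 0) ' ')) := by
  have hle1 := lcpLen_le_left cs ct
  have hle2 := lcpLen_le_right cs ct
  have hk : (shiftLcp cs ct).getD i 0 = lcpLen (cs.drop (i + 1)) (ct.drop i) := shiftLcp_getD cs ct i hi
  have htake : cs.take i = ct.take i := take_eq_take_of_le cs ct i hp
  have h2 : (cs.take i ++ cs.drop (i + 1)) < ct ↔ cs.drop (i + 1) < ct.drop i := by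
    calc (cs.take i ++ cs.drop (i + 1)) < ct
        ↔ (ct.take i ++ cs.drop (i + 1)) < ct.take i ++ ct.drop i := by
          rw [htake, List.take_append_drop]
      _ ↔ cs.drop (i + 1) < ct.drop i := append_lt_append_left _ _ _
  rw [h2, lt_iff_lcp, hk]
  rw [getD_drop', getD_drop', List.length_drop, List.length_drop]
  constructor <;> rintro (⟨h1, h2⟩ | ⟨h1, h2, h3⟩)
  · left; omega
  · right
    refine ⟨by omega, by omega, ?_⟩
    convert h3 using 3
  · left; omega
  · right
    refine ⟨by omega, by omega, ?_⟩
    convert h3 using 3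

theorem sdel_gt (cs ct : List Char) (i : Nat) (hi : i < cs.length) (hp : lcpLen cs ct < i) :
    (cs.take i ++ cs.drop (i + 1)) < ct ↔
      (lcpLen cs ct < ct.length ∧ cs.getD (lcpLen cs ct) ' ' < ct.getD (lcpLen cs ct) ' ') := by
  have hpm := lcpLen_le_right cs ct
  have hpn := lcpLen_le_left cs ct
  set p := lcpLen cs ct with hpdef
  have hlen : (cs.take i ++ cs.drop (i + 1)).length = cs.length - 1 := by
    simp [List.length_take]; omega
  have htk : (cs.take i ++ cs.drop (i + 1)).take p = cs.take p := by
    rw [List.take_append_of_le_length (by simp [List.length_take]; omega), List.take_take,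
      Nat.min_eq_left (by omega)]
  have hgd : (cs.take i ++ cs.drop (i + 1)).getD p ' ' = cs.getD p ' ' := by
    rw [getD_append_left' _ _ _ _ (by simp [List.length_take]; omega), getD_take' _ _ _ _ hp]
  have hlcp : lcpLen (cs.take i ++ cs.drop (i + 1)) ct = p := by
    apply lcpLen_eq_of _ _ p (by omega) hpm
    · rw [htk]; exact take_lcpLen cs ct
    · by_cases hm : p = ct.length
      · right; left; exact hm
      · right; right
        rw [hgd]
        exact getD_lcpLen_ne cs ct (by omega) (by omega)
  rw [lt_iff_lcp, hlcp, hlen, hgd]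
  constructor
  · rintro (⟨h1, h2⟩ | ⟨h1, h2, h3⟩)
    · omega
    · exact ⟨h2, h3⟩
  · rintro ⟨h1, h2⟩
    right; exact ⟨by omega, h1, h2⟩

theorem tdel_le (cs ct : List Char) (j : Nat) (hj : j < ct.length) (hp : j ≤ lcpLen cs ct) :
    cs < (ct.take j ++ ct.drop (j + 1)) ↔
      ((j + (shiftLcp ct cs).getD j 0 = cs.length ∧ j + 1 + (shiftLcp ct cs).getD j 0 < ct.length) ∨
       (j + (shiftLcp ct cs).getD j 0 < cs.length ∧ j + 1 + (shiftLcp ct cs).getD j 0 < ct.length ∧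
        cs.getD (j + (shiftLcp ct cs).getD j 0) ' ' < ct.getD (j + 1 + (shiftLcp ct cs).getD j 0) ' ')) := by
  have hle1 := lcpLen_le_left cs ct
  have hle2 := lcpLen_le_right cs ct
  have hk : (shiftLcp ct cs).getD j 0 = lcpLen (ct.drop (j + 1)) (cs.drop j) := shiftLcp_getD ct cs j hj
  have htake : cs.take j = ct.take j := take_eq_take_of_le cs ct j hp
  have h2 : cs < (ct.take j ++ ct.drop (j + 1)) ↔ cs.drop j < ct.drop (j + 1) := by
    calc cs < (ct.take j ++ ct.drop (j + 1))
        ↔ (cs.take j ++ cs.drop j) < (cs.take j ++ ct.drop (j + 1)) := by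
          rw [← htake, List.take_append_drop]
      _ ↔ cs.drop j < ct.drop (j + 1) := append_lt_append_left _ _ _
  rw [h2, lt_iff_lcp, lcpLen_comm, ← hk]
  rw [getD_drop', getD_drop', List.length_drop, List.length_drop]
  constructor <;> rintro (⟨h1, h2⟩ | ⟨h1, h2, h3⟩)
  · left; omega
  · right
    refine ⟨by omega, by omega, ?_⟩
    convert h3 using 3
  · left; omega
  · right
    refine ⟨by omega, by omega, ?_⟩
    convert h3 using 3

theorem tdel_gt (cs ct : List Char) (j : Nat) (hj : j < ct.length) (hp : lcpLen cs ct < j) :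
    cs < (ct.take j ++ ct.drop (j + 1)) ↔
      (if lcpLen cs ct < cs.length then cs.getD (lcpLen cs ct) ' ' < ct.getD (lcpLen cs ct) ' '
       else cs.length + 1 < ct.length) := by
  have hpm := lcpLen_le_right cs ct
  have hpn := lcpLen_le_left cs ct
  set p := lcpLen cs ct with hpdef
  have hlen : (ct.take j ++ ct.drop (j + 1)).length = ct.length - 1 := by
    simp [List.length_take]; omega
  have htk : (ct.take j ++ ct.drop (j + 1)).take p = ct.take p := by
    rw [List.take_append_of_le_length (by simp [List.length_take]; omega), List.take_take,
      Nat.min_eq_left (by omega)]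
  have hgd : (ct.take j ++ ct.drop (j + 1)).getD p ' ' = ct.getD p ' ' := by
    rw [getD_append_left' _ _ _ _ (by simp [List.length_take]; omega), getD_take' _ _ _ _ hp]
  have hlcp : lcpLen cs (ct.take j ++ ct.drop (j + 1)) = p := by
    apply lcpLen_eq_of _ _ p (by omega) (by omega)
    · rw [htk]; exact take_lcpLen cs ct
    · by_cases hn : p = cs.length
      · left; exact hn
      · right; right
        rw [hgd]
        exact getD_lcpLen_ne cs ct (by omega) (by omega)
  rw [lt_iff_lcp, hlcp, hlen, hgd]
  by_cases hn : p < cs.length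
  · rw [if_pos hn]
    constructor
    · rintro (⟨h1, h2⟩ | ⟨h1, h2, h3⟩)
      · omega
      · exact h3
    · intro h
      right; exact ⟨hn, by omega, h⟩
  · rw [if_neg hn]
    constructor
    · rintro (⟨h1, h2⟩ | ⟨h1, h2, h3⟩)
      · omega
      · omega
    · intro h
      left; omega

theorem loop1_eq (cs ct : List Char) (init : Int) :
    (PySem.List.pyRange 0 (PySem.Chars.len cs) 1).foldl (fun res i =>
      if PySem.Chars.strIsdigit [PySem.List.pyGetD cs i ' '] then
        if (PySem.List.slice cs none (some i) ++ PySem.List.slice cs (some (i + 1)) none) < ct then res + 1 else res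
      else res) init =
    (List.range cs.length).foldl (fun res i =>
      if PySem.Chars.strIsdigit [cs.getD i ' '] then
        if lcpLen cs ct < i then
          if lcpLen cs ct < ct.length ∧ cs.getD (lcpLen cs ct) ' ' < ct.getD (lcpLen cs ct) ' ' then res + 1 else res
        else
          if (i + 1 + (shiftLcp cs ct).getD i 0 = cs.length ∧ i + (shiftLcp cs ct).getD i 0 < ct.length) ∨ (i + 1 + (shiftLcp cs ct).getD i 0 < cs.length ∧ i + (shiftLcp cs ct).getD i 0 < ct.length ∧ cs.getD (i + 1 + (shiftLcp cs ct).getD i 0) ' ' < ct.getD (i + (shiftLcp cs ct).getD i 0) ' ') then res + 1 else res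
      else res) init := by
  have hr : PySem.List.pyRange 0 (PySem.Chars.len cs) 1 = (List.range cs.length).map (fun k : Nat => (k : Int)) := by
    rw [PySem.Chars.len_eq, PySem.List.pyRange_one]
    norm_num
  rw [hr, List.foldl_map]
  apply PySem.List.foldl_congr_mem
  intro acc k hkmem
  have hk : k < cs.length := List.mem_range.mp hkmem
  have hs1 : PySem.List.slice cs none (some (k : Int)) = cs.take k := by
    rw [PySem.List.slice_to cs (b := (k : Int)) (by positivity)]
    simp
  have hs2 : PySem.List.slice cs (some ((k : Int) + 1)) none = cs.drop (k + 1) := by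
    rw [PySem.List.slice_from cs (a := (k : Int) + 1) (by positivity)]
    congr 1
  simp only [PySem.List.pyGetD_natCast, hs1, hs2]
  refine if_congr Iff.rfl ?_ rfl
  by_cases hp : lcpLen cs ct < k
  · rw [if_pos hp, if_congr (sdel_gt cs ct k hk hp) rfl rfl]
  · rw [if_neg hp, if_congr (sdel_le cs ct k hk (Nat.le_of_not_lt hp)) rfl rfl]

theorem loop2_eq (cs ct : List Char) (init : Int) :
    (PySem.List.pyRange 0 (PySem.Chars.len ct) 1).foldl (fun res i =>
      if PySem.Chars.strIsdigit [PySem.List.pyGetD ct i ' '] then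
        if cs < (PySem.List.slice ct none (some i) ++ PySem.List.slice ct (some (i + 1)) none) then res + 1 else res
      else res) init =
    (List.range ct.length).foldl (fun res j =>
      if PySem.Chars.strIsdigit [ct.getD j ' '] then
        if lcpLen cs ct < j then
          if (if lcpLen cs ct < cs.length then cs.getD (lcpLen cs ct) ' ' < ct.getD (lcpLen cs ct) ' ' else cs.length + 1 < ct.length) then res + 1 else res
        else
          if (j + (shiftLcp ct cs).getD j 0 = cs.length ∧ j + 1 + (shiftLcp ct cs).getD j 0 < ct.length) ∨ (j + (shiftLcp ct cs).getD j 0 < cs.length ∧ j + 1 + (shiftLcp ct cs).getD j 0 < ct.length ∧ cs.getD (j + (shiftLcp ct cs).getD j 0) ' ' < ct.getD (j + 1 + (shiftLcp ct cs).getD j 0) ' ') then res + 1 else res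
      else res) init := by
  have hr : PySem.List.pyRange 0 (PySem.Chars.len ct) 1 = (List.range ct.length).map (fun k : Nat => (k : Int)) := by
    rw [PySem.Chars.len_eq, PySem.List.pyRange_one]
    norm_num
  rw [hr, List.foldl_map]
  apply PySem.List.foldl_congr_mem
  intro acc j hjmem
  have hj : j < ct.length := List.mem_range.mp hjmem
  have hs1 : PySem.List.slice ct none (some (j : Int)) = ct.take j := by
    rw [PySem.List.slice_to ct (b := (j : Int)) (by positivity)]
    simp
  have hs2 : PySem.List.slice ct (some ((j : Int) + 1)) none = ct.drop (j + 1) := by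
    rw [PySem.List.slice_from ct (a := (j : Int) + 1) (by positivity)]
    congr 1
  simp only [PySem.List.pyGetD_natCast, hs1, hs2]
  refine if_congr Iff.rfl ?_ rfl
  by_cases hp : lcpLen cs ct < j
  · rw [if_pos hp, if_congr (tdel_gt cs ct j hj hp) rfl rfl]
  · rw [if_neg hp, if_congr (tdel_le cs ct j hj (Nat.le_of_not_lt hp)) rfl rfl]

-- ===== VERDICT (by name: the statement is the Claim_ definition above) =====
theorem solution_spec : Claim_equal_solution := by
  intro s t _
  unfold Spec_solution solution solution_alt
  simp only [loop1_eq, loop2_eq]
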